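-- pv_equiv track=rewrite | github.com/thealper2/codewars-solutions | 7-kyu/even_and_odd.py | even_and_odd
-- ===== SOURCE A (Python) =====
-- def even_and_odd(n):
--     i = j = 0
--     even = odd = 0
--     k = 0
--
--     while 10**k <= n:
--         d = n // 10**k % 10
--         if d % 2 == 0:
--             even += d * (10 ** i)
--             i += 1
--         else:
--             odd += d * (10 ** j)
--             j += 1
--
--         k += 1
--
--     return (even, odd)
-- ===== SOURCE B (Python) =====
-- def even_and_odd(n):
--     # Traverse the decimal string most-significant-first, building each
--     # result with a multiply-accumulate instead of arithmetic digit
--     # extraction by powers of 10.  Natural domain: n >= 0.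
--     even = odd = 0
--     for c in str(n):
--         d = ord(c) - 48
--         if d % 2 == 0:
--             even = even * 10 + d
--         else:
--             odd = odd * 10 + d
--     return (even, odd)
-- ===== Notes on version B (the rewrite author's own statement) =====
-- stated objective: simpler
-- what changed: A extracts digits least-significant-first with n // 10**k % 10 and places them with separately tracked powers 10**i / 10**j; B traverses str(n) most-significant-first and builds each result with a single multiply-accumulate (acc*10+d), needing no power bookkeeping.
-- outside the precondition, e.g. on even_and_odd(-5): A returns (0, 0), B returns (0, -25); on even_and_odd(-70): A returns (0, 0), B returns (0, -23)
import Mathlib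
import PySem

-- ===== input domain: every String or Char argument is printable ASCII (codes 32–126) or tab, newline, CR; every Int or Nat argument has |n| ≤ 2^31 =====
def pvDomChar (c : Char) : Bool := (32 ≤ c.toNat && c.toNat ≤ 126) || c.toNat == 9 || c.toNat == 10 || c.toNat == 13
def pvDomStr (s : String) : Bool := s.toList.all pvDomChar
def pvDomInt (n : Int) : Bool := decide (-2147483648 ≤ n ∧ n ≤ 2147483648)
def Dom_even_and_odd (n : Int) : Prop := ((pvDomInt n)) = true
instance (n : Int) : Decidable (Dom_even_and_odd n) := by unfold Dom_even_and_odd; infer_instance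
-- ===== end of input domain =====

-- B replaces A's least-significant-first arithmetic digit extraction (n // 10**k % 10 with
-- 10**i / 10**j placement powers) by a most-significant-first traversal of str(n) with a
-- multiply-accumulate per digit; objective: simpler.

-- ===== PORT A =====
-- the while loop; i, j, k are Python ints that stay ≥ 0, kept as Nat counters (exact: they
-- only ever appear as exponents/increments starting from 0)
def evenOddLoopA (n : Int) (i j : Nat) (even odd : Int) (k : Nat) : Int × Int :=
  if h : (10 : Int) ^ k ≤ n then
    let d := PySem.Int.mod (PySem.Int.floordiv n ((10 : Int) ^ k)) 10
    if PySem.Int.mod d 2 = 0 then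
      evenOddLoopA n (i + 1) j (even + d * (10 : Int) ^ i) odd (k + 1)
    else
      evenOddLoopA n i (j + 1) even (odd + d * (10 : Int) ^ j) (k + 1)
  else (even, odd)
termination_by (n + 1 - (10 : Int) ^ k).toNat
decreasing_by
  all_goals
    have h1 : (1 : Int) ≤ 10 ^ k := one_le_pow₀ (by norm_num)
    omega

def even_and_odd (n : Int) : Int × Int :=
  evenOddLoopA n 0 0 0 0 0

-- ===== PORT B =====
-- the for-loop body over the characters of str(n)
def evenOddStepB (acc : Int × Int) (c : Char) : Int × Int :=
  let d : Int := (c.toNat : Int) - 48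
  if PySem.Int.mod d 2 = 0 then (acc.1 * 10 + d, acc.2)
  else (acc.1, acc.2 * 10 + d)

def even_and_odd_alt (n : Int) : Int × Int :=
  ((PySem.Int.toStr n).toList).foldl evenOddStepB (0, 0)

-- ===== PRECONDITION & SPEC =====
-- Pre_ restricts to the task's natural domain n ≥ 0: a negative n has no digit split to
-- speak of — A's while-guard never fires there, while B's string traversal meets the sign
-- character, and neither resulting value is specified by the task.
def Pre_even_and_odd (n : Int) : Prop := 0 ≤ n
instance (n : Int) : Decidable (Pre_even_and_odd n) := by unfold Pre_even_and_odd; infer_instance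

def pvWitness_even_and_odd : Int := 3947

def Spec_even_and_odd (n : Int) (out : Int × Int) : Prop := out = even_and_odd_alt n
instance (n : Int) (out : Int × Int) : Decidable (Spec_even_and_odd n out) := by unfold Spec_even_and_odd; infer_instance

-- ===== CLAIM (what is proved, stated in full; the proofs are below) =====
def Claim_equal_even_and_odd : Prop := ∀ (n : Int), Dom_even_and_odd n → Pre_even_and_odd n → Spec_even_and_odd n (even_and_odd n)

-- ===== LEMMAS AND PROOFS =====

-- Nat.ofDigits_cons specialised to an Int base (Mathlib's ofDigits_cons is Nat-valued)
theorem ofDigits_cons_int (b : Int) (d : Nat) (l : List Nat) :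
    Nat.ofDigits b (d :: l) = (d : Int) + b * Nat.ofDigits b l := rfl

-- value (as an Int) of the even-digit subsequence of a least-significant-first digit list
def valEv (l : List Nat) : Int := Nat.ofDigits (10 : Int) (l.filter (fun d => d % 2 = 0))
def valOd (l : List Nat) : Int := Nat.ofDigits (10 : Int) (l.filter (fun d => ¬ d % 2 = 0))

theorem evenOddLoopA_inv (m : Nat) (k i j : Nat) (even odd : Int)
    (hk : (Nat.digits 10 m).length - k = t) :
    evenOddLoopA (m : Int) i j even odd k =
      (even + (10 : Int) ^ i * valEv ((Nat.digits 10 m).drop k),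
       odd + (10 : Int) ^ j * valOd ((Nat.digits 10 m).drop k)) := by
  induction t generalizing k i j even odd with
  | zero =>
    have hlen : (Nat.digits 10 m).length ≤ k := by omega
    have hm : m < 10 ^ k := (Nat.digits_length_le_iff (by norm_num) m).mp hlen
    rw [evenOddLoopA]
    have hng : ¬ ((10 : Int) ^ k ≤ (m : Int)) := by
      exact_mod_cast not_le.mpr (by exact_mod_cast hm)
    rw [dif_neg hng]
    rw [List.drop_eq_nil_of_le hlen]
    simp [valEv, valOd, Nat.ofDigits]
  | succ t ih =>
    have hklen : k < (Nat.digits 10 m).length := by omega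
    have hle : 10 ^ k ≤ m := (Nat.lt_digits_length_iff (by norm_num) m).mp hklen
    rw [evenOddLoopA]
    have hg : (10 : Int) ^ k ≤ (m : Int) := by exact_mod_cast hle
    rw [dif_pos hg]
    -- the extracted digit is the k-th digit
    have hpow : ((10 : Int) ^ k) = ((10 ^ k : Nat) : Int) := by push_cast; ring
    have hdrop : (Nat.digits 10 m).drop k =
        (Nat.digits 10 m)[k] :: (Nat.digits 10 m).drop (k + 1) :=
      List.drop_eq_getElem_cons hklen
    set d0 : Nat := (Nat.digits 10 m)[k] with hd0
    have hd0lt : d0 < 10 :=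
      Nat.digits_lt_base (by norm_num) (List.getElem_mem hklen)
    clear_value d0
    have hdiv : m / 10 ^ k = Nat.ofDigits 10 ((Nat.digits 10 m).drop k) :=
      Nat.self_div_pow_eq_ofDigits_drop k m (by norm_num)
    have hdmod : m / 10 ^ k % 10 = d0 := by
      rw [hdiv, hdrop, Nat.ofDigits_cons]
      omega
    have hd : PySem.Int.mod (PySem.Int.floordiv (m : Int) ((10 : Int) ^ k)) 10 = (d0 : Int) := by
      rw [hpow, PySem.Int.floordiv_natCast]
      have : ((10 : Int)) = ((10 : Nat) : Int) := by norm_num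
      rw [this, PySem.Int.mod_natCast, hdmod]
    rw [hd]
    have hpar : PySem.Int.mod ((d0 : Int)) 2 = ((d0 % 2 : Nat) : Int) := by
      exact_mod_cast PySem.Int.mod_natCast d0 2
    by_cases hev : d0 % 2 = 0
    · rw [if_pos (by rw [hpar, hev]; norm_num)]
      rw [ih (k + 1) (i + 1) j _ _ (by omega)]
      rw [hdrop]
      have hfe : (d0 :: (Nat.digits 10 m).drop (k + 1)).filter (fun d => d % 2 = 0) =
          d0 :: ((Nat.digits 10 m).drop (k + 1)).filter (fun d => d % 2 = 0) := by
        simp [hev]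
      have hfo : (d0 :: (Nat.digits 10 m).drop (k + 1)).filter (fun d => ¬ d % 2 = 0) =
          ((Nat.digits 10 m).drop (k + 1)).filter (fun d => ¬ d % 2 = 0) := by
        simp [hev]
      simp only [valEv, valOd, hfe, hfo, ofDigits_cons_int, Prod.mk.injEq]
      refine ⟨?_, ?_⟩ <;> first | trivial | ring
    · rw [if_neg (by rw [hpar]; omega)]
      rw [ih (k + 1) i (j + 1) _ _ (by omega)]
      rw [hdrop]
      have hfe : (d0 :: (Nat.digits 10 m).drop (k + 1)).filter (fun d => d % 2 = 0) =
          ((Nat.digits 10 m).drop (k + 1)).filter (fun d => d % 2 = 0) := by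
        simp [hev]
      have hfo : (d0 :: (Nat.digits 10 m).drop (k + 1)).filter (fun d => ¬ d % 2 = 0) =
          d0 :: ((Nat.digits 10 m).drop (k + 1)).filter (fun d => ¬ d % 2 = 0) := by
        simp [List.filter_cons, hev]
      simp only [valEv, valOd, hfe, hfo, ofDigits_cons_int, Prod.mk.injEq]
      refine ⟨?_, ?_⟩ <;> first | trivial | ring

theorem even_and_odd_eq_digits (m : Nat) :
    even_and_odd (m : Int) = (valEv (Nat.digits 10 m), valOd (Nat.digits 10 m)) := by
  have := evenOddLoopA_inv m 0 0 0 0 0 rfl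
  simpa [even_and_odd] using this

-- Nat.toDigits agrees with Nat.digits (mapped to chars, most-significant first) for m ≠ 0
theorem toDigitsCore_eq (f : Nat) : ∀ (m : Nat) (l : List Char), m ≠ 0 → m ≤ f →
    Nat.toDigitsCore 10 f m l = ((Nat.digits 10 m).map Nat.digitChar).reverse ++ l := by
  induction f with
  | zero => intro m l hm hf; omega
  | succ f ih =>
    intro m l hm hf
    rw [Nat.toDigitsCore]
    have hdig : Nat.digits 10 m = m % 10 :: Nat.digits 10 (m / 10) :=
      Nat.digits_def' (by norm_num) (Nat.pos_of_ne_zero hm)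
    by_cases h0 : m / 10 = 0
    · rw [if_pos h0]
      rw [hdig, h0]
      simp
    · rw [if_neg h0]
      rw [ih (m / 10) _ h0 (by have := Nat.div_lt_self (Nat.pos_of_ne_zero hm) (by norm_num : 1 < 10); omega)]
      rw [hdig]
      simp

theorem toDigits_eq (m : Nat) (hm : m ≠ 0) :
    Nat.toDigits 10 m = ((Nat.digits 10 m).map Nat.digitChar).reverse := by
  rw [Nat.toDigits, toDigitsCore_eq (m + 1) m [] hm (by omega)]
  simp

-- decoding a digit character
theorem digitChar_decode (d : Nat) (hd : d < 10) :
    ((Nat.digitChar d).toNat : Int) - 48 = (d : Int) := by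
  interval_cases d <;> decide

theorem digitChar_parity (d : Nat) (hd : d < 10) :
    PySem.Int.mod (((Nat.digitChar d).toNat : Int) - 48) 2 = ((d % 2 : Nat) : Int) := by
  interval_cases d <;> decide

-- B's fold over the most-significant-first digit characters computes the two values
theorem foldB_eq (l : List Nat) (hl : ∀ d ∈ l, d < 10) : ∀ (e o : Int),
    (((l.map Nat.digitChar).reverse).foldl evenOddStepB (e, o)) =
      (e * (10 : Int) ^ (l.filter (fun d => d % 2 = 0)).length + valEv l,
       o * (10 : Int) ^ (l.filter (fun d => ¬ d % 2 = 0)).length + valOd l) := by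
  induction l with
  | nil => intro e o; simp [valEv, valOd, Nat.ofDigits]
  | cons d0 tl ih =>
    intro e o
    have hd0 : d0 < 10 := hl d0 (by simp)
    have htl : ∀ d ∈ tl, d < 10 := fun d hd => hl d (by simp [hd])
    simp only [List.map_cons, List.reverse_cons, List.foldl_append, List.foldl_cons, List.foldl_nil]
    rw [ih htl e o]
    simp only [evenOddStepB]
    rw [digitChar_decode d0 hd0]
    by_cases hev : d0 % 2 = 0
    · rw [if_pos (by rw [← digitChar_decode d0 hd0, digitChar_parity d0 hd0, hev]; norm_num)]
      have hfe : (d0 :: tl).filter (fun d => d % 2 = 0) = d0 :: tl.filter (fun d => d % 2 = 0) := by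
        simp [hev]
      have hfo : (d0 :: tl).filter (fun d => ¬ d % 2 = 0) = tl.filter (fun d => ¬ d % 2 = 0) := by
        simp [hev]
      simp only [valEv, valOd, hfe, hfo, ofDigits_cons_int, List.length_cons, Prod.mk.injEq]
      refine ⟨?_, ?_⟩ <;> first | trivial | ring
    · rw [if_neg (by rw [← digitChar_decode d0 hd0, digitChar_parity d0 hd0]; omega)]
      have hfe : (d0 :: tl).filter (fun d => d % 2 = 0) = tl.filter (fun d => d % 2 = 0) := by
        simp [hev]
      have hfo : (d0 :: tl).filter (fun d => ¬ d % 2 = 0) = d0 :: tl.filter (fun d => ¬ d % 2 = 0) := by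
        simp [List.filter_cons, hev]
      simp only [valEv, valOd, hfe, hfo, ofDigits_cons_int, List.length_cons, Prod.mk.injEq]
      refine ⟨?_, ?_⟩ <;> first | trivial | ring

theorem even_and_odd_alt_eq_digits (m : Nat) :
    even_and_odd_alt (m : Int) = (valEv (Nat.digits 10 m), valOd (Nat.digits 10 m)) := by
  unfold even_and_odd_alt
  rw [PySem.Int.toList_toStr]
  by_cases hm : m = 0
  · subst hm
    decide
  · have hch : PySem.Int.toChars (m : Int) = Nat.toDigits 10 m := by
      simp [PySem.Int.toChars, Int.toNat_natCast, not_lt.mpr (Int.natCast_nonneg m)]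
    rw [hch, toDigits_eq m hm,
        foldB_eq (Nat.digits 10 m) (fun d hd => Nat.digits_lt_base (by norm_num) hd) 0 0]
    simp

-- ===== VERDICT (by name: the statement is the Claim_ definition above) =====
theorem even_and_odd_spec : Claim_equal_even_and_odd := by
  intro n _ hpre
  unfold Spec_even_and_odd
  obtain ⟨m, rfl⟩ : ∃ m : Nat, n = (m : Int) := ⟨n.toNat, (Int.toNat_of_nonneg hpre).symm⟩
  rw [even_and_odd_eq_digits, even_and_odd_alt_eq_digits]
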